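-- pv_equiv track=rewrite | github.com/IBruteDude/JotVault | app_server/utils/diffseq_algo.py | diff_seq
-- ===== SOURCE A (Python) =====
-- def diff_seq(s1, s2):
--     """Compute the sequence of operations for transforming string s1 to s2
--     """
--     # Construct the longest common subsequence matrix
--     m, n = len(s1), len(s2)
--     dp = [[0] * (n + 1) for _ in range(m + 1)]
--
--     for m in range(1, m + 1):
--         for n in range(1, n + 1):
--             if s1[m - 1] == s2[n - 1]:
--                 dp[m][n] = dp[m - 1][n - 1] + 1
--             else:
--                 dp[m][n] = max(dp[m - 1][n], dp[m][n - 1])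
--
--     # Reconstruct the diff by tracing back through the matrix
--     ops = []
--
--     while m > 0 or n > 0:
--         if m > 0 and (n == 0 or dp[m][n] == dp[m - 1][n]):
--             ops.append(('D', s1[m - 1]))
--             m -= 1
--         elif n > 0 and (m == 0 or dp[m][n] == dp[m][n - 1]):
--             ops.append(('A', s2[n - 1]))
--             n -= 1
--         else:
--             ops.append(('N', s1[m - 1]))
--             m -= 1
--             n -= 1
--
--     ops.reverse()
--     return ops
-- ===== SOURCE B (Python) =====
-- def diff_seq(s1, s2):
--     """Compute the sequence of operations for transforming string s1 to s2
--
--     B flattens the LCS table into one 1-D array filled by a single index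
--     loop (index arithmetic instead of nested row/column loops) and records
--     a flat parent-pointer array; the traceback follows the stored pointers.
--     """
--     m, n = len(s1), len(s2)
--     w = n + 1
--     dp = []
--     par = []
--     for t in range((m + 1) * w):
--         i, j = divmod(t, w)
--         if i == 0:
--             dp.append(0)
--             par.append('E' if j == 0 else 'L')
--         elif j == 0:
--             dp.append(0)
--             par.append('U')
--         else:
--             up, left = dp[t - w], dp[t - 1]
--             if s1[i - 1] == s2[j - 1]:
--                 v = dp[t - w - 1] + 1
--             else:
--                 v = max(up, left)
--             dp.append(v)
--             par.append('U' if v == up else 'L' if v == left else 'N')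
--     ops = []
--     i, j = m, n
--     while i or j:
--         d = par[i * w + j]
--         if d == 'U':
--             ops.append(('D', s1[i - 1]))
--             i -= 1
--         elif d == 'L':
--             ops.append(('A', s2[j - 1]))
--             j -= 1
--         else:
--             ops.append(('N', s1[i - 1]))
--             i -= 1
--             j -= 1
--     ops.reverse()
--     return ops
-- ===== Notes on version B (the rewrite author's own statement) =====
-- stated objective: alternative
-- what changed: B flattens the LCS table into a single 1-D array filled by one index loop with div/mod index arithmetic (instead of A's nested row/column loops over a 2-D matrix), additionally stores a flat parent-pointer array during the fill, and the traceback follows those stored pointers instead of re-reading and comparing dp entries as A does.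
import Mathlib
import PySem

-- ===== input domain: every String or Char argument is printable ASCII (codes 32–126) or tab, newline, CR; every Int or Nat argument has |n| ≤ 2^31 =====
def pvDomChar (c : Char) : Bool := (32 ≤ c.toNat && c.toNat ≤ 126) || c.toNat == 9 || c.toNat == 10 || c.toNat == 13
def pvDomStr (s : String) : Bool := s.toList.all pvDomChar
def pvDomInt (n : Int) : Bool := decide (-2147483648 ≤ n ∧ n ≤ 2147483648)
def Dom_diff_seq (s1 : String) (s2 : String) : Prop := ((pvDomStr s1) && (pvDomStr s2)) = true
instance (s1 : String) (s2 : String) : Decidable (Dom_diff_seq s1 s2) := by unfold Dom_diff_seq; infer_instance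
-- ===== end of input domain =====

-- B replaces A's nested-loop 2-D dp matrix and comparison-recomputing traceback by a single
-- index loop filling a flat 1-D dp array plus a flat parent-pointer array read back in the
-- traceback (objective: alternative, same asymptotic cost).


-- ===== PORT A =====
-- inner dp-fill loop of A: walk the rest of s2 together with the rest of the previous dp row,
-- carrying the value to the left; produces dp[i][1..n]
def pvRowAuxA (c : Char) : List Char → List Nat → Nat → List Nat
  | [], _, _ => []
  | _ :: _, [], _ => []            -- unreachable: prev row is always 1 longer than the s2-suffix
  | ch :: rest, pd :: ptail, left =>
    let up := ptail.headD 0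
    let v := if c = ch then pd + 1 else max up left
    v :: pvRowAuxA c rest ptail v

-- one full dp row (dp[i][0] = 0 prepended)
def pvRowA (l2 : List Char) (c : Char) (prev : List Nat) : List Nat :=
  0 :: pvRowAuxA c l2 prev 0

-- outer dp-fill loop of A: builds the list of all dp rows
def pvDpRowsA (l2 : List Char) : List Char → List Nat → List (List Nat)
  | [], prev => [prev]
  | c :: cs, prev => prev :: pvDpRowsA l2 cs (pvRowA l2 c prev)

-- dp[i][j] (always in range when A reads it, so the defaults are never returned)
def pvDPget (dp : List (List Nat)) (i j : Nat) : Nat := (dp.getD i []).getD j 0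

-- A's while-loop traceback; fuel = m+n is exact (each step decreases i+j).
-- Ops are produced in Python's append order; diff_seq reverses at the end, like A.
def pvTraceA (dp : List (List Nat)) (l1 l2 : List Char) : Nat → Nat → Nat → List (String × String)
  | 0, _, _ => []
  | fuel + 1, i, j =>
    if i = 0 ∧ j = 0 then []
    else if 0 < i ∧ (j = 0 ∨ pvDPget dp i j = pvDPget dp (i - 1) j) then
      ("D", String.ofList [l1.getD (i - 1) ' ']) :: pvTraceA dp l1 l2 fuel (i - 1) j
    else if 0 < j ∧ (i = 0 ∨ pvDPget dp i j = pvDPget dp i (j - 1)) then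
      ("A", String.ofList [l2.getD (j - 1) ' ']) :: pvTraceA dp l1 l2 fuel i (j - 1)
    else
      ("N", String.ofList [l1.getD (i - 1) ' ']) :: pvTraceA dp l1 l2 fuel (i - 1) (j - 1)

def diff_seq (s1 : String) (s2 : String) : List (String × String) :=
  let l1 := s1.toList
  let l2 := s2.toList
  let dp := pvDpRowsA l2 l1 (List.replicate (l2.length + 1) 0)
  (pvTraceA dp l1 l2 (l1.length + l2.length) l1.length l2.length).reverse

-- ===== PORT B =====
-- B's single loop body: for index t of the flat (m+1)*(n+1) table, with i = t / w, j = t % w,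
-- push the dp value onto the flat dp array and the parent pointer onto the flat par array
def pvStepB (l1 l2 : List Char) (w : Nat) (st : List Nat × List Char) (t : Nat) :
    List Nat × List Char :=
  let i := t / w
  let j := t % w
  if i = 0 then (st.1 ++ [0], st.2 ++ [if j = 0 then 'E' else 'L'])
  else if j = 0 then (st.1 ++ [0], st.2 ++ ['U'])
  else
    let up := st.1.getD (t - w) 0
    let left := st.1.getD (t - 1) 0
    let v := if l1.getD (i - 1) ' ' = l2.getD (j - 1) ' ' then st.1.getD (t - w - 1) 0 + 1
             else max up left
    let d := if v = up then 'U' else if v = left then 'L' else 'N'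
    (st.1 ++ [v], st.2 ++ [d])

-- B's pointer-following traceback over the flat parent array
def pvTraceB (par : List Char) (l1 l2 : List Char) (w : Nat) : Nat → Nat → Nat → List (String × String)
  | 0, _, _ => []
  | fuel + 1, i, j =>
    if i = 0 ∧ j = 0 then []
    else
      let d := par.getD (i * w + j) 'E'
      if d = 'U' then ("D", String.ofList [l1.getD (i - 1) ' ']) :: pvTraceB par l1 l2 w fuel (i - 1) j
      else if d = 'L' then ("A", String.ofList [l2.getD (j - 1) ' ']) :: pvTraceB par l1 l2 w fuel i (j - 1)
      else ("N", String.ofList [l1.getD (i - 1) ' ']) :: pvTraceB par l1 l2 w fuel (i - 1) (j - 1)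

def diff_seq_alt (s1 : String) (s2 : String) : List (String × String) :=
  let l1 := s1.toList
  let l2 := s2.toList
  let m := l1.length
  let n := l2.length
  let w := n + 1
  let st := (List.range ((m + 1) * w)).foldl (pvStepB l1 l2 w) ([], [])
  (pvTraceB st.2 l1 l2 w (m + n) m n).reverse

-- ===== PRECONDITION & SPEC =====
def Spec_diff_seq (s1 : String) (s2 : String) (out : List (String × String)) : Prop := out = diff_seq_alt s1 s2
instance (s1 : String) (s2 : String) (out : List (String × String)) : Decidable (Spec_diff_seq s1 s2 out) := by unfold Spec_diff_seq; infer_instance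

-- ===== CLAIM (what is proved, stated in full; the proofs are below) =====
def Claim_equal_diff_seq : Prop := ∀ (s1 : String) (s2 : String), Dom_diff_seq s1 s2 → Spec_diff_seq s1 s2 (diff_seq s1 s2)

-- ===== LEMMAS AND PROOFS =====

-- the mathematical LCS dp both tables tabulate
def dpF (l1 l2 : List Char) : Nat → Nat → Nat
  | 0, _ => 0
  | _ + 1, 0 => 0
  | i + 1, j + 1 =>
    if l1.getD i ' ' = l2.getD j ' ' then dpF l1 l2 i j + 1
    else max (dpF l1 l2 i (j + 1)) (dpF l1 l2 (i + 1) j)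
  termination_by i j => i + j

-- the direction B stores at (i, j) for i, j ≥ 1
def dirF (l1 l2 : List Char) (i j : Nat) : Char :=
  if dpF l1 l2 i j = dpF l1 l2 (i - 1) j then 'U'
  else if dpF l1 l2 i j = dpF l1 l2 i (j - 1) then 'L'
  else 'N'

-- what B's flat arrays hold at flat index t
def valB (l1 l2 : List Char) (w t : Nat) : Nat := dpF l1 l2 (t / w) (t % w)
def pdirB (l1 l2 : List Char) (w t : Nat) : Char :=
  if t / w = 0 then (if t % w = 0 then 'E' else 'L')
  else if t % w = 0 then 'U'
  else dirF l1 l2 (t / w) (t % w)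

theorem getD_map_range {α : Type} (f : Nat → α) (k i : Nat) (h : i < k) (d : α) :
    ((List.range k).map f).getD i d = f i := by
  rw [List.getD_eq_getElem _ d (by simpa using h)]
  simp

theorem flat_div (w a b : Nat) (hw : 0 < w) (hb : b < w) : (w * a + b) / w = a := by
  rw [Nat.mul_add_div hw, Nat.div_eq_of_lt hb, Nat.add_zero]

theorem flat_mod (w a b : Nat) (hb : b < w) : (w * a + b) % w = b := by
  rw [Nat.mul_add_mod, Nat.mod_eq_of_lt hb]

theorem dpF_zero (l1 l2 : List Char) (j : Nat) : dpF l1 l2 0 j = 0 := by rw [dpF]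

theorem dpF_zero' (l1 l2 : List Char) (i : Nat) : dpF l1 l2 i 0 = 0 := by
  cases i with
  | zero => rw [dpF]
  | succ i => rw [dpF]

-- loop invariant of B's single fill loop
theorem fillB_spec (l1 l2 : List Char) (w : Nat) (hw : 0 < w) :
    ∀ k, (List.range k).foldl (pvStepB l1 l2 w) ([], [])
      = ((List.range k).map (valB l1 l2 w), (List.range k).map (pdirB l1 l2 w)) := by
  intro k
  induction k with
  | zero => simp
  | succ k ih =>
    rw [List.range_succ, List.foldl_append, ih, List.map_append, List.map_append]
    simp only [List.foldl_cons, List.foldl_nil, List.map_cons, List.map_nil]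
    have hk : w * (k / w) + k % w = k := Nat.div_add_mod k w
    have hjw : k % w < w := Nat.mod_lt _ hw
    rw [pvStepB]
    simp only []
    rcases Nat.eq_zero_or_pos (k / w) with hi0 | hip
    · rw [if_pos hi0, valB, pdirB, hi0, if_pos rfl, dpF_zero]
    · rw [if_neg (by omega)]
      rcases Nat.eq_zero_or_pos (k % w) with hj0 | hjp
      · rw [if_pos hj0, valB, pdirB, hj0, if_neg (by omega), if_pos rfl, dpF_zero']
      · rw [if_neg (by omega)]
        obtain ⟨i', hi⟩ : ∃ i', k / w = i' + 1 := ⟨k / w - 1, by omega⟩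
        obtain ⟨j', hj⟩ : ∃ j', k % w = j' + 1 := ⟨k % w - 1, by omega⟩
        have hk2 : w * (i' + 1) + (j' + 1) = k := by rw [← hi, ← hj]; exact hk
        have hm : w * (i' + 1) = w * i' + w := by ring
        have hjw' : j' + 1 < w := by omega
        -- the three lookups hit earlier entries of the flat dp array
        have hup : ((List.range k).map (valB l1 l2 w)).getD (k - w) 0 = dpF l1 l2 i' (j' + 1) := by
          rw [getD_map_range _ _ _ (by omega), valB,
            show k - w = w * i' + (j' + 1) from by omega,
            flat_div w i' (j' + 1) hw (by omega), flat_mod w i' (j' + 1) (by omega)]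
        have hleft : ((List.range k).map (valB l1 l2 w)).getD (k - 1) 0 = dpF l1 l2 (i' + 1) j' := by
          rw [getD_map_range _ _ _ (by omega), valB,
            show k - 1 = w * (i' + 1) + j' from by omega,
            flat_div w (i' + 1) j' hw (by omega), flat_mod w (i' + 1) j' (by omega)]
        have hdiag : ((List.range k).map (valB l1 l2 w)).getD (k - w - 1) 0 = dpF l1 l2 i' j' := by
          rw [getD_map_range _ _ _ (by omega), valB,
            show k - w - 1 = w * i' + j' from by omega,
            flat_div w i' j' hw (by omega), flat_mod w i' j' (by omega)]
        rw [hup, hleft, hdiag, hi, hj]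
        have hv : (if l1.getD (i' + 1 - 1) ' ' = l2.getD (j' + 1 - 1) ' '
              then dpF l1 l2 i' j' + 1 else max (dpF l1 l2 i' (j' + 1)) (dpF l1 l2 (i' + 1) j'))
            = dpF l1 l2 (i' + 1) (j' + 1) := by
          rw [dpF]; simp
        rw [valB, pdirB, hi, hj, hv]
        simp [dirF]

theorem pdirB_at (l1 l2 : List Char) (w i j : Nat) (hw : j < w) :
    pdirB l1 l2 w (i * w + j)
      = (if i = 0 then (if j = 0 then 'E' else 'L') else if j = 0 then 'U' else dirF l1 l2 i j) := by
  rw [pdirB, show i * w + j = w * i + j from by ring_nf,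
    flat_div w i j (by omega) hw, flat_mod w i j hw]

-- A-side lemmas (relating A's 2-D table to dpF), as in the A port's structure
theorem rowAuxA_spec (l1 l2 : List Char) (i : Nat) :
    ∀ k, k ≤ l2.length →
    pvRowAuxA (l1.getD i ' ') (l2.drop k)
      ((List.range' k (l2.length + 1 - k)).map (dpF l1 l2 i)) (dpF l1 l2 (i + 1) k)
    = (List.range' (k + 1) (l2.length - k)).map (dpF l1 l2 (i + 1)) := by
  suffices h : ∀ d k, k ≤ l2.length → l2.length - k = d →
      pvRowAuxA (l1.getD i ' ') (l2.drop k)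
        ((List.range' k (l2.length + 1 - k)).map (dpF l1 l2 i)) (dpF l1 l2 (i + 1) k)
      = (List.range' (k + 1) (l2.length - k)).map (dpF l1 l2 (i + 1)) by
    intro k hk; exact h _ k hk rfl
  intro d
  induction d with
  | zero =>
    intro k hk h0
    have : k = l2.length := by omega
    subst this
    simp [pvRowAuxA, List.drop_length]
  | succ d ih =>
    intro k hk hs
    have hk' : k < l2.length := by omega
    have e1 : l2.length + 1 - k = d + 2 := by omega
    have e2 : l2.length - k = d + 1 := by omega
    have hdrop : l2.drop k = l2[k] :: l2.drop (k + 1) := List.drop_eq_getElem_cons hk'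
    rw [hdrop, e1, e2, List.range'_succ, List.map_cons, List.range'_succ, List.map_cons]
    simp only [pvRowAuxA, List.headD_cons]
    have hv : (if l1.getD i ' ' = l2[k] then dpF l1 l2 i k + 1
        else max (dpF l1 l2 i (k + 1)) (dpF l1 l2 (i + 1) k)) = dpF l1 l2 (i + 1) (k + 1) := by
      rw [dpF, List.getD_eq_getElem l2 ' ' hk']
    rw [hv]
    have e3 : l2.length + 1 - (k + 1) = d + 1 := by omega
    have e4 : l2.length - (k + 1) = d := by omega
    have ihh := ih (k + 1) (by omega) (by omega)
    rw [e3, e4, List.range'_succ, List.map_cons] at ihh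
    rw [List.map_cons, ihh]

-- row i of the dp table as a vector
def rowVec (l1 l2 : List Char) (i : Nat) : List Nat :=
  (List.range' 0 (l2.length + 1)).map (dpF l1 l2 i)

theorem rowA_vec (l1 l2 : List Char) (i : Nat) :
    pvRowA l2 (l1.getD i ' ') (rowVec l1 l2 i) = rowVec l1 l2 (i + 1) := by
  have h := rowAuxA_spec l1 l2 i 0 (Nat.zero_le _)
  simp only [List.drop_zero, Nat.sub_zero] at h
  rw [show dpF l1 l2 (i + 1) 0 = 0 from dpF_zero' l1 l2 (i + 1)] at h
  rw [pvRowA, rowVec, rowVec, h, List.range'_succ, List.map_cons, dpF_zero']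

theorem dpRowsA_spec (l1 l2 : List Char) :
    ∀ t, t ≤ l1.length →
    pvDpRowsA l2 (l1.drop t) (rowVec l1 l2 t)
    = (List.range' t (l1.length + 1 - t)).map (rowVec l1 l2) := by
  suffices h : ∀ d t, t ≤ l1.length → l1.length - t = d →
      pvDpRowsA l2 (l1.drop t) (rowVec l1 l2 t)
      = (List.range' t (l1.length + 1 - t)).map (rowVec l1 l2) by
    intro t ht; exact h _ t ht rfl
  intro d
  induction d with
  | zero =>
    intro t ht h0
    have : t = l1.length := by omega
    subst this
    have e : l1.length + 1 - l1.length = 1 := by omega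
    rw [List.drop_length, e, List.range'_one]
    simp [pvDpRowsA]
  | succ d ih =>
    intro t ht hs
    have ht' : t < l1.length := by omega
    have e1 : l1.length + 1 - t = d + 2 := by omega
    have hdrop : l1.drop t = l1[t] :: l1.drop (t + 1) := List.drop_eq_getElem_cons ht'
    rw [hdrop, e1, List.range'_succ, List.map_cons]
    simp only [pvDpRowsA]
    have hc : l1[t] = l1.getD t ' ' := (List.getD_eq_getElem l1 ' ' ht').symm
    rw [hc, rowA_vec]
    have ihh := ih (t + 1) (by omega) (by omega)
    have e2 : l1.length + 1 - (t + 1) = d + 1 := by omega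
    rw [e2] at ihh
    rw [ihh]

theorem getD_map_range' {α : Type} (f : Nat → α) (a len i : Nat) (h : i < len) (d : α) :
    ((List.range' a len).map f).getD i d = f (a + i) := by
  rw [List.getD_eq_getElem _ d (by simpa using h)]
  simp

-- A's comparison-driven traceback equals B's pointer-driven traceback
theorem trace_eq (l1 l2 : List Char) (w : Nat) (dp : List (List Nat)) (par : List Char)
    (hdp : ∀ i j, i ≤ l1.length → j ≤ l2.length → pvDPget dp i j = dpF l1 l2 i j)
    (hparU : ∀ i, 1 ≤ i → i ≤ l1.length → par.getD (i * w + 0) 'E' = 'U')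
    (hparL : ∀ j, 1 ≤ j → j ≤ l2.length → par.getD (0 * w + j) 'E' = 'L')
    (hpar : ∀ i j, 1 ≤ i → i ≤ l1.length → 1 ≤ j → j ≤ l2.length →
      par.getD (i * w + j) 'E' = dirF l1 l2 i j) :
    ∀ fuel i j, i ≤ l1.length → j ≤ l2.length →
      pvTraceA dp l1 l2 fuel i j = pvTraceB par l1 l2 w fuel i j := by
  intro fuel
  induction fuel with
  | zero => intro i j _ _; rfl
  | succ fuel ih =>
    intro i j hi hj
    simp only [pvTraceA, pvTraceB]
    by_cases h0 : i = 0 ∧ j = 0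
    · rw [if_pos h0, if_pos h0]
    rw [if_neg h0, if_neg h0]
    cases i with
    | zero =>
      have hj1 : 1 ≤ j := by omega
      rw [hparL j hj1 hj]
      rw [if_neg (by simp), if_pos ⟨by omega, Or.inl rfl⟩, if_neg (by decide), if_pos rfl]
      rw [ih 0 (j - 1) hi (by omega)]
    | succ i' =>
      cases j with
      | zero =>
        rw [hparU (i' + 1) (by omega) hi]
        rw [if_pos ⟨by omega, Or.inl rfl⟩, if_pos rfl]
        rw [ih (i' + 1 - 1) 0 (by omega) hj]
      | succ j' =>
        rw [hpar (i' + 1) (j' + 1) (by omega) hi (by omega) hj]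
        rw [hdp (i' + 1) (j' + 1) hi hj, hdp (i' + 1 - 1) (j' + 1) (by omega) hj,
          hdp (i' + 1) (j' + 1 - 1) hi (by omega)]
        rw [dirF]
        by_cases h1 : dpF l1 l2 (i' + 1) (j' + 1) = dpF l1 l2 (i' + 1 - 1) (j' + 1)
        · rw [if_pos h1, if_pos ⟨by omega, Or.inr h1⟩, if_pos rfl]
          rw [ih (i' + 1 - 1) (j' + 1) (by omega) hj]
        rw [if_neg h1, if_neg (by rintro ⟨-, h⟩; rcases h with h | h; omega; exact h1 h)]
        by_cases h2 : dpF l1 l2 (i' + 1) (j' + 1) = dpF l1 l2 (i' + 1) (j' + 1 - 1)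
        · rw [if_pos h2, if_pos ⟨by omega, Or.inr h2⟩, if_neg (by decide), if_pos rfl]
          rw [ih (i' + 1) (j' + 1 - 1) hi (by omega)]
        rw [if_neg h2, if_neg (by rintro ⟨-, h⟩; rcases h with h | h; omega; exact h2 h),
          if_neg (by decide), if_neg (by decide)]
        rw [ih (i' + 1 - 1) (j' + 1 - 1) (by omega) (by omega)]

theorem rowVec_zero (l1 l2 : List Char) :
    rowVec l1 l2 0 = List.replicate (l2.length + 1) 0 := by
  rw [rowVec]
  rw [List.map_congr_left (fun j _ => dpF_zero l1 l2 j), List.map_const']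
  simp

-- ===== VERDICT (by name: the statement is the Claim_ definition above) =====
theorem diff_seq_spec : Claim_equal_diff_seq := by
  intro s1 s2 _
  show diff_seq s1 s2 = diff_seq_alt s1 s2
  simp only [diff_seq, diff_seq_alt]
  set l1 := s1.toList
  set l2 := s2.toList
  set m := l1.length
  set n := l2.length with hn
  set w := n + 1 with hw
  have hdpTab : pvDpRowsA l2 l1 (List.replicate (n + 1) 0)
      = (List.range' 0 (m + 1)).map (rowVec l1 l2) := by
    have h := dpRowsA_spec l1 l2 0 (Nat.zero_le _)
    rw [List.drop_zero, rowVec_zero] at h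
    simpa using h
  have hfill := fillB_spec l1 l2 w (by omega) ((m + 1) * w)
  rw [hdpTab, hfill]
  congr 1
  apply trace_eq l1 l2 w
  · intro i j hi hj
    rw [pvDPget, getD_map_range' (rowVec l1 l2) 0 (m + 1) i (by omega), Nat.zero_add,
      rowVec, getD_map_range' (dpF l1 l2 i) 0 (n + 1) j (by omega), Nat.zero_add]
  · intro i h1 hi
    rw [getD_map_range _ _ _ (by nlinarith), pdirB_at l1 l2 w i 0 (by omega),
      if_neg (by omega), if_pos rfl]
  · intro j h1 hj
    rw [getD_map_range _ _ _ (by nlinarith), pdirB_at l1 l2 w 0 j (by omega),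
      if_pos rfl, if_neg (by omega)]
  · intro i j h1 hi hj1 hj
    rw [getD_map_range _ _ _ (by nlinarith), pdirB_at l1 l2 w i j (by omega),
      if_neg (by omega), if_neg (by omega)]
  · exact le_refl m
  · exact le_refl n
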